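-- pv_equiv track=rewrite | github.com/rarepi/qAnime | qAnime.py | patternReplace
-- ===== SOURCE A (Python) =====
-- def patternReplace(pattern, old, new, fill=False):
--     count = 0
--     idx = pattern.find(old)
--     if idx >= 0:
--         count = 1
--         lookahead = len(old)
--         while pattern[idx+lookahead:idx+lookahead+len(old)] == old:
--             count += 1
--             lookahead += len(old)
--         if fill:
--             new = str(new).zfill(count)
--         pattern = pattern[:idx] + new + pattern[idx+len(old)*count:]
--     return pattern
-- ===== SOURCE B (Python) =====
-- def patternReplace(pattern, old, new, fill=False):
--     parts = pattern.split(old)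
--     if len(parts) == 1:
--         return pattern
--     count = 1
--     while count < len(parts) - 1 and parts[count] == '':
--         count += 1
--     if fill:
--         new = str(new).zfill(count)
--     return parts[0] + new + old.join(parts[count:])
-- ===== Notes on version B (the rewrite author's own statement) =====
-- stated objective: alternative
-- what changed: Replaced the explicit find + lookahead slice-comparison counting loop with str.split(old): the run length falls out as the leading empty chunks after the first piece, and the result is rebuilt with parts[0] + new + old.join of the remaining chunks.
import Mathlib
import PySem

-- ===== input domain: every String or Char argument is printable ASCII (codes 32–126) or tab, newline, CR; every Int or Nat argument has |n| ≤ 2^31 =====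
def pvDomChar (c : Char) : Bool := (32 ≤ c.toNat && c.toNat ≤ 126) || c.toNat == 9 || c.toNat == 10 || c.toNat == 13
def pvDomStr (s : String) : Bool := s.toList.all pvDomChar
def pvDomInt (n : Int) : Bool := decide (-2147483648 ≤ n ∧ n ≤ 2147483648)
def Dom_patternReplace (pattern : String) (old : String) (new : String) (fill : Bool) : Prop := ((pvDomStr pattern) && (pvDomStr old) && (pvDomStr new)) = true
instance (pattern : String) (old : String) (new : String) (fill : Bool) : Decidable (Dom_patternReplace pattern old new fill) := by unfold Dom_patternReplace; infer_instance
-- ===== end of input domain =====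

-- B replaces A's find + lookahead-slice counting loop by str.split(old): the run length is the
-- number of leading empty chunks after the first piece, and the result is rebuilt with join
-- (objective: alternative). Return value only.

-- ===== PORT A =====
-- the `while pattern[idx+lookahead:idx+lookahead+len(old)] == old` loop; fuel only makes it
-- total (with old ≠ "" the loop terminates within pattern.length steps); returns final count
def pvWhileA (p o : List Char) (idx : Nat) : Nat → Nat → Nat → Nat
  | _, count, 0 => count
  | lookahead, count, fuel+1 =>
    if PySem.List.slice p (some ((idx + lookahead : Nat) : Int)) (some ((idx + lookahead + o.length : Nat) : Int)) = o then
      pvWhileA p o idx (lookahead + o.length) (count + 1) fuel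
    else count

def patternReplace (pattern : String) (old : String) (new : String) (fill : Bool) : String :=
  let idx := PySem.Str.find pattern old
  if idx ≥ 0 then
    let count := pvWhileA pattern.toList old.toList idx.toNat old.toList.length 1 (pattern.toList.length + 1)
    let new := if fill then PySem.Str.zfill new (count : Int) else new
    String.ofList (PySem.List.slice pattern.toList none (some idx) ++ new.toList ++
      PySem.List.slice pattern.toList (some ((idx.toNat + old.toList.length * count : Nat) : Int)) none)
  else pattern

-- ===== PORT B =====
-- the `while count < len(parts) - 1 and parts[count] == ''` loop of Source B
def pvCountLoop (parts : List (List Char)) (count : Nat) : Nat :=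
  if count < parts.length - 1 ∧ parts.getD count [] = [] then pvCountLoop parts (count + 1)
  else count
termination_by parts.length - count
decreasing_by omega

def patternReplace_alt (pattern : String) (old : String) (new : String) (fill : Bool) : String :=
  let parts := PySem.Chars.splitOn pattern.toList old.toList
  if parts.length = 1 then pattern
  else
    let count := pvCountLoop parts 1
    let new := if fill then PySem.Str.zfill new (count : Int) else new
    String.ofList (parts.getD 0 [] ++ new.toList ++ PySem.Chars.join old.toList (parts.drop count))

-- ===== PRECONDITION & SPEC =====
-- Pre_ excludes only old = "": there Python A loops forever (pattern[idx:idx] == "" always), so A never returns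
-- (and B raises ValueError from str.split('')).
def Pre_patternReplace (pattern : String) (old : String) (new : String) (fill : Bool) : Prop := old ≠ ""
instance (pattern : String) (old : String) (new : String) (fill : Bool) : Decidable (Pre_patternReplace pattern old new fill) := by unfold Pre_patternReplace; infer_instance
def pvWitness_patternReplace : String × String × String × Bool := ("xaaay", "a", "7", true)
def Spec_patternReplace (pattern : String) (old : String) (new : String) (fill : Bool) (out : String) : Prop := out = patternReplace_alt pattern old new fill
instance (pattern : String) (old : String) (new : String) (fill : Bool) (out : String) : Decidable (Spec_patternReplace pattern old new fill out) := by unfold Spec_patternReplace; infer_instance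

-- ===== CLAIM (what is proved, stated in full; the proofs are below) =====
def Claim_equal_patternReplace : Prop := ∀ (pattern : String) (old : String) (new : String) (fill : Bool), Dom_patternReplace pattern old new fill → Pre_patternReplace pattern old new fill → Spec_patternReplace pattern old new fill (patternReplace pattern old new fill)

-- ===== LEMMAS AND PROOFS =====

-- run length: number of consecutive leading copies of o in s (proof-side helper)
def pvRunLen (o : List Char) (s : List Char) : Nat :=
  if h : o ≠ [] ∧ o.isPrefixOf s then 1 + pvRunLen o (s.drop o.length) else 0
termination_by s.length
decreasing_by
  rcases h with ⟨ho, hp⟩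
  have hle : o.length ≤ s.length := (List.isPrefixOf_iff_prefix.mp hp).length_le
  have : 0 < o.length := List.length_pos_iff.mpr ho
  simp [List.length_drop]; omega

-- clean recursive specification of Python split (sep ≠ "")
def pvSplitR (o : List Char) : List Char → List (List Char)
  | [] => [[]]
  | c :: rest =>
    if h : o ≠ [] ∧ o.isPrefixOf (c :: rest) then [] :: pvSplitR o ((c :: rest).drop o.length)
    else (pvSplitR o rest).modifyHead (c :: ·)
termination_by s => s.length
decreasing_by
  · rcases h with ⟨ho, hp⟩
    have hle : o.length ≤ (c :: rest).length := (List.isPrefixOf_iff_prefix.mp hp).length_le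
    have : 0 < o.length := List.length_pos_iff.mpr ho
    simp [List.length_drop]; omega
  · simp

theorem pvRunLen_nil (o : List Char) (ho : o ≠ []) : pvRunLen o [] = 0 := by
  rw [pvRunLen, dif_neg]
  rintro ⟨-, h⟩
  exact ho (List.prefix_nil.mp (List.isPrefixOf_iff_prefix.mp h))

theorem pvRunLen_of_prefix (o s : List Char) (ho : o ≠ []) (hp : o <+: s) :
    pvRunLen o s = 1 + pvRunLen o (s.drop o.length) := by
  rw [pvRunLen, dif_pos ⟨ho, List.isPrefixOf_iff_prefix.mpr hp⟩]

theorem pvRunLen_of_not_prefix (o s : List Char) (hp : ¬ o <+: s) : pvRunLen o s = 0 := by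
  rw [pvRunLen, dif_neg]
  rintro ⟨-, h⟩
  exact hp (List.isPrefixOf_iff_prefix.mp h)

-- A's while loop computes count + (run length at offset idx + lookahead)
theorem pvWhileA_spec (p o : List Char) (ho : o ≠ []) (idx : Nat) :
    ∀ fuel lookahead count, p.length + 1 ≤ idx + lookahead + fuel →
      pvWhileA p o idx lookahead count fuel = count + pvRunLen o (p.drop (idx + lookahead)) := by
  intro fuel
  induction fuel with
  | zero =>
    intro lookahead count hf
    have hnil : p.drop (idx + lookahead) = [] := List.drop_eq_nil_of_le (by omega)
    rw [pvWhileA, hnil, pvRunLen_nil o ho]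
    omega
  | succ fuel ih =>
    intro lookahead count hf
    rw [pvWhileA]
    have hslice : PySem.List.slice p (some ((idx + lookahead : Nat) : Int))
        (some ((idx + lookahead + o.length : Nat) : Int)) = (p.drop (idx + lookahead)).take o.length := by
      rw [PySem.List.slice_natCast]; congr 1; omega
    have hop : 0 < o.length := List.length_pos_iff.mpr ho
    by_cases hc : (p.drop (idx + lookahead)).take o.length = o
    · have hpre : o <+: p.drop (idx + lookahead) := by
        rw [List.prefix_iff_eq_take]; exact hc.symm
      rw [hslice, if_pos hc]
      rw [ih (lookahead + o.length) (count + 1) (by omega)]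
      rw [pvRunLen_of_prefix o _ ho hpre, List.drop_drop]
      have : idx + lookahead + o.length = idx + (lookahead + o.length) := by omega
      rw [this]
      omega
    · rw [hslice, if_neg hc]
      rw [pvRunLen_of_not_prefix o _ (fun hpre => hc (List.prefix_iff_eq_take.mp hpre).symm)]
      omega

-- pvSplitR never returns []
theorem pvSplitR_ne_nil (o s : List Char) : pvSplitR o s ≠ [] := by
  induction s using pvSplitR.induct o with
  | case1 => simp [pvSplitR]
  | case2 c rest h ih => rw [pvSplitR, dif_pos h]; simp
  | case3 c rest h ih =>
    rw [pvSplitR, dif_neg h]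
    cases hX : pvSplitR o rest with
    | nil => exact absurd hX ih
    | cons a t => simp

-- the fuel-based splitOn.go agrees with pvSplitR (sep ≠ [], enough fuel)
theorem pvGo_eq (o : List Char) (ho : o ≠ []) :
    ∀ fuel l cur acc, l.length + 1 ≤ fuel →
      PySem.Chars.splitOn.go o fuel l cur acc
        = acc.reverse ++ (pvSplitR o l).modifyHead (cur.reverse ++ ·) := by
  intro fuel
  induction fuel with
  | zero => intro l cur acc hf; omega
  | succ fuel ih =>
    intro l cur acc hf
    cases l with
    | nil =>
      simp [PySem.Chars.splitOn.go, pvSplitR]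
    | cons c rest =>
      rw [PySem.Chars.splitOn.go]
      by_cases hp : o.isPrefixOf (c :: rest)
      · have hle : o.length ≤ (c :: rest).length := (List.isPrefixOf_iff_prefix.mp hp).length_le
        have hop : 0 < o.length := List.length_pos_iff.mpr ho
        rw [if_pos hp, ih _ _ _ (by simp at hf ⊢; omega)]
        rw [pvSplitR, dif_pos ⟨ho, hp⟩]
        cases pvSplitR o (List.drop o.length (c :: rest)) <;> simp
      · rw [if_neg hp, ih _ _ _ (by simp at hf ⊢; omega)]
        rw [pvSplitR, dif_neg (by rintro ⟨-, h⟩; exact hp h)]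
        cases hX : pvSplitR o rest with
        | nil => exact absurd hX (pvSplitR_ne_nil o rest)
        | cons a t => simp

theorem pvSplitOn_eq (o s : List Char) (ho : o ≠ []) :
    PySem.Chars.splitOn s o = pvSplitR o s := by
  rw [PySem.Chars.splitOn, pvGo_eq o ho (s.length + 1) s [] [] (by omega)]
  cases hX : pvSplitR o s with
  | nil => exact absurd hX (pvSplitR_ne_nil o s)
  | cons a t => simp

-- join undoes pvSplitR
theorem pvJoin_splitR (o s : List Char) (ho : o ≠ []) :
    PySem.Chars.join o (pvSplitR o s) = s := by
  induction s using pvSplitR.induct o with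
  | case1 => simp [pvSplitR, PySem.Chars.join, List.intercalate]
  | case2 c rest h ih =>
    rw [pvSplitR, dif_pos h]
    obtain ⟨t, ht⟩ := List.isPrefixOf_iff_prefix.mp h.2
    have hdrop : (c :: rest).drop o.length = t := by rw [← ht]; exact List.drop_left
    rw [hdrop] at ih ⊢
    cases hX : pvSplitR o t with
    | nil => exact absurd hX (pvSplitR_ne_nil o _)
    | cons a tl =>
      rw [hX] at ih
      rw [PySem.Chars.join_cons_cons, ih, ← ht]
      simp
  | case3 c rest h ih =>
    rw [pvSplitR, dif_neg h]
    cases hX : pvSplitR o rest with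
    | nil => exact absurd hX (pvSplitR_ne_nil o rest)
    | cons a tl =>
      rw [hX] at ih
      cases tl with
      | nil =>
        rw [PySem.Chars.join_singleton] at ih
        simp [PySem.Chars.join_singleton, ih]
      | cons b tl' =>
        rw [PySem.Chars.join_cons_cons] at ih
        simp only [List.modifyHead]
        rw [PySem.Chars.join_cons_cons, ← ih]
        simp

-- no occurrence anywhere: split yields the whole string as one chunk
theorem pvSplitR_no_occ (o s : List Char) (h : ∀ j, ¬ o <+: s.drop j) :
    pvSplitR o s = [s] := by
  induction s with
  | nil => simp [pvSplitR]
  | cons c rest ih =>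
    rw [pvSplitR, dif_neg (by rintro ⟨-, hp⟩; exact h 0 (by simpa using List.isPrefixOf_iff_prefix.mp hp))]
    rw [ih (fun j => by simpa using h (j + 1))]
    simp

-- the run part: leading copies of o become leading empty chunks
theorem pvSplitR_run (o : List Char) (ho : o ≠ []) (s : List Char) :
    pvSplitR o s = List.replicate (pvRunLen o s) [] ++ pvSplitR o (s.drop (o.length * pvRunLen o s)) := by
  induction s using pvSplitR.induct o with
  | case1 =>
    rw [pvRunLen_nil o ho]; simp
  | case2 c rest h ih =>
    have hp : o <+: (c :: rest) := List.isPrefixOf_iff_prefix.mp h.2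
    rw [pvSplitR, dif_pos h, pvRunLen_of_prefix o _ ho hp, ih]
    rw [List.drop_drop]
    have : o.length * (1 + pvRunLen o ((c :: rest).drop o.length))
        = o.length + o.length * pvRunLen o ((c :: rest).drop o.length) := by ring
    rw [this, List.replicate_add]
    simp [Nat.add_comm]
  | case3 c rest h ih =>
    rw [pvRunLen_of_not_prefix o _ (fun hp => h ⟨ho, List.isPrefixOf_iff_prefix.mpr hp⟩)]
    simp

-- after the maximal run, o is not a prefix
theorem pvRunLen_max (o : List Char) (ho : o ≠ []) (s : List Char) :
    ¬ o <+: s.drop (o.length * pvRunLen o s) := by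
  induction s using pvSplitR.induct o with
  | case1 =>
    rw [pvRunLen_nil o ho]
    simpa using fun h => ho (List.prefix_nil.mp h)
  | case2 c rest h ih =>
    have hp : o <+: (c :: rest) := List.isPrefixOf_iff_prefix.mp h.2
    rw [pvRunLen_of_prefix o _ ho hp]
    have : o.length * (1 + pvRunLen o ((c :: rest).drop o.length))
        = o.length + o.length * pvRunLen o ((c :: rest).drop o.length) := by ring
    rw [this, ← List.drop_drop]
    exact ih
  | case3 c rest h ih =>
    rw [pvRunLen_of_not_prefix o _ (fun hp => h ⟨ho, List.isPrefixOf_iff_prefix.mpr hp⟩)]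
    simpa using fun hp => h ⟨ho, List.isPrefixOf_iff_prefix.mpr hp⟩

-- the leading part up to the first occurrence
theorem pvSplitR_lead (o : List Char) (ho : o ≠ []) :
    ∀ j s, j ≤ s.length → (∀ k < j, ¬ o <+: s.drop k) →
      pvSplitR o s = (pvSplitR o (s.drop j)).modifyHead (s.take j ++ ·) := by
  intro j
  induction j with
  | zero =>
    intro s _ _
    cases hX : pvSplitR o s with
    | nil => exact absurd hX (pvSplitR_ne_nil o s)
    | cons a t => simp [hX]
  | succ j ih =>
    intro s hj hmin
    cases s with
    | nil => simp at hj
    | cons c rest =>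
      rw [pvSplitR, dif_neg (by rintro ⟨-, hp⟩; exact hmin 0 (by omega) (by simpa using List.isPrefixOf_iff_prefix.mp hp))]
      rw [ih rest (by simpa using hj) (fun k hk => by simpa using hmin (k + 1) (by omega))]
      cases hX : pvSplitR o (rest.drop j) with
      | nil => exact absurd hX (pvSplitR_ne_nil o _)
      | cons a t => simp [hX]

-- B's while loop returns k + 1 on parts = h0 :: replicate k [] ++ rest with the right tail shape
theorem pvCountLoop_spec (h0 : List Char) (k : Nat) (rest : List (List Char))
    (hrest : rest ≠ []) (htail : rest.getD 0 [] = [] → rest = [[]]) :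
    ∀ c, 1 ≤ c → c ≤ k + 1 →
      pvCountLoop (h0 :: List.replicate k [] ++ rest) c = k + 1 := by
  have hlen : (h0 :: List.replicate k [] ++ rest).length = k + 1 + rest.length := by
    simp only [List.length_cons, List.length_append, List.length_replicate]
  have hrlen : 1 ≤ rest.length := List.length_pos_iff.mpr hrest
  suffices H : ∀ n c, 1 ≤ c → c ≤ k + 1 → k + 1 - c = n →
      pvCountLoop (h0 :: List.replicate k [] ++ rest) c = k + 1 by
    intro c h1 h2; exact H (k + 1 - c) c h1 h2 rfl
  intro n
  induction n with
  | zero =>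
    intro c h1 h2 hn
    have hc : c = k + 1 := by omega
    subst hc
    rw [pvCountLoop, if_neg]
    rintro ⟨hlt, hget⟩
    have hget' : rest.getD 0 [] = [] := by
      have h : (h0 :: List.replicate k [] ++ rest).getD (k + 1) [] = rest.getD 0 [] := by
        simp only [List.getD]
        rw [List.getElem?_append_right (by simp)]
        simp
      rw [← h]; exact hget
    have hr : rest = [[]] := htail hget'
    rw [hr] at hlt
    simp only [List.length_cons, List.length_append, List.length_replicate,
      List.length_nil] at hlt
    omega
  | succ n ihn =>
    intro c h1 h2 hn
    have hck : c ≤ k := by omega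
    have hcond : c < (h0 :: List.replicate k [] ++ rest).length - 1
        ∧ (h0 :: List.replicate k [] ++ rest).getD c [] = [] := by
      refine ⟨by omega, ?_⟩
      cases c with
      | zero => omega
      | succ c' =>
        have hc' : c' < k := by omega
        simp only [List.getD]
        rw [List.getElem?_append_left (by simpa using hc')]
        simp [hc']
    rw [pvCountLoop, if_pos hcond]
    exact ihn (c + 1) (by omega) (by omega) (by omega)

theorem patternReplace_spec_aux (pattern old new : String) (fill : Bool)
    (hpre : old ≠ "") :
    patternReplace pattern old new fill = patternReplace_alt pattern old new fill := by
  have ho : old.toList ≠ [] := by simpa [String.toList_eq_nil_iff] using hpre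
  have hop : 0 < old.toList.length := List.length_pos_iff.mpr ho
  unfold patternReplace patternReplace_alt
  rw [PySem.Str.find_eq pattern old, pvSplitOn_eq old.toList pattern.toList ho]
  by_cases hocc : old.toList <:+: pattern.toList
  · -- old occurs in pattern
    have hfind : 0 ≤ PySem.Chars.find pattern.toList old.toList :=
      (PySem.Chars.find_nonneg_iff pattern.toList old.toList).mpr hocc
    obtain ⟨hpre0, hmin⟩ := PySem.Chars.find_spec hfind
    set i := (PySem.Chars.find pattern.toList old.toList).toNat with hi
    set r := pvRunLen old.toList (pattern.toList.drop i) with hr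
    have hr1 : 1 ≤ r := by
      rw [hr, pvRunLen_of_prefix old.toList _ ho hpre0]; omega
    have hilen : i ≤ pattern.toList.length := by
      by_contra hcon
      push_neg at hcon
      rw [List.drop_eq_nil_of_le (by omega)] at hpre0
      exact ho (List.prefix_nil.mp hpre0)
    -- split structure
    have hsplit : pvSplitR old.toList pattern.toList
        = pattern.toList.take i :: List.replicate (r - 1) []
            ++ pvSplitR old.toList (pattern.toList.drop (i + old.toList.length * r)) := by
      rw [pvSplitR_lead old.toList ho i pattern.toList hilen hmin]
      rw [pvSplitR_run old.toList ho (pattern.toList.drop i)]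
      rw [← hr]
      have hrepl : List.replicate r ([] : List Char) = [] :: List.replicate (r - 1) [] := by
        obtain ⟨r', hrr⟩ : ∃ r', r = r' + 1 := ⟨r - 1, by omega⟩
        rw [hrr]
        simp [List.replicate_succ]
      rw [hrepl, List.drop_drop]
      simp
    set t := pattern.toList.drop (i + old.toList.length * r) with htdef
    have hrest_ne : pvSplitR old.toList t ≠ [] := pvSplitR_ne_nil _ _
    have hmaxt : ¬ old.toList <+: t := by
      have h := pvRunLen_max old.toList ho (pattern.toList.drop i)
      rw [List.drop_drop, ← hr] at h
      rw [htdef]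
      exact h
    have htail : (pvSplitR old.toList t).getD 0 [] = [] → pvSplitR old.toList t = [[]] := by
      intro hget
      cases hT : t with
      | nil => rw [hT] at *; simp [pvSplitR]
      | cons a tl =>
        rw [hT] at hget
        rw [pvSplitR] at hget
        rw [dif_neg (by rintro ⟨-, hp⟩; exact hmaxt (hT ▸ List.isPrefixOf_iff_prefix.mp hp))] at hget
        cases hX : pvSplitR old.toList tl with
        | nil => exact absurd hX (pvSplitR_ne_nil _ _)
        | cons b t2 => rw [hX] at hget; simp [List.getD] at hget
    -- parts length ≥ 2
    have hlen2 : (pvSplitR old.toList pattern.toList).length ≠ 1 := by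
      rw [hsplit]
      have : 1 ≤ (pvSplitR old.toList t).length := List.length_pos_iff.mpr hrest_ne
      simp only [List.length_cons, List.length_append, List.length_replicate]
      omega
    rw [if_pos hfind, if_neg hlen2]
    -- count agreement
    have hcount : pvCountLoop (pvSplitR old.toList pattern.toList) 1 = r := by
      rw [hsplit, pvCountLoop_spec _ (r - 1) _ hrest_ne htail 1 (by omega) (by omega)]
      omega
    have hcountA : pvWhileA pattern.toList old.toList i old.toList.length 1
        (pattern.toList.length + 1) = r := by
      rw [pvWhileA_spec pattern.toList old.toList ho _ (pattern.toList.length + 1)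
        old.toList.length 1 (by omega)]
      rw [hr, pvRunLen_of_prefix old.toList _ ho hpre0, List.drop_drop]
    -- slices
    have hs1 : PySem.List.slice pattern.toList none (some (PySem.Chars.find pattern.toList old.toList))
        = pattern.toList.take i :=
      PySem.List.slice_to pattern.toList hfind
    have hs2 : PySem.List.slice pattern.toList (some ((i + old.toList.length * r : Nat) : Int)) none
        = t := by
      rw [PySem.List.slice_from pattern.toList (by positivity), Int.toNat_natCast, htdef]
    -- pieces of B's output
    have hhead : (pvSplitR old.toList pattern.toList).getD 0 [] = pattern.toList.take i := by
      rw [hsplit]; simp [List.getD]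
    have hdrop' : (pvSplitR old.toList pattern.toList).drop r = pvSplitR old.toList t := by
      rw [hsplit]
      obtain ⟨r', hrr⟩ : ∃ r', r = r' + 1 := ⟨r - 1, by omega⟩
      rw [hrr]
      simp only [Nat.add_sub_cancel, List.drop_succ_cons]
      rw [List.drop_left' (by simp)]
    simp only [← hi]
    simp only [hcountA, hcount, hhead, hs1, hs2, hdrop', pvJoin_splitR old.toList t ho]
  · -- no occurrence: both programs leave pattern unchanged
    have hfind : PySem.Chars.find pattern.toList old.toList = -1 :=
      (PySem.Chars.find_eq_neg_one_iff pattern.toList old.toList).mpr hocc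
    have hno : ∀ j, ¬ old.toList <+: pattern.toList.drop j := by
      intro j hj
      exact hocc (List.infix_iff_prefix_suffix.mpr ⟨pattern.toList.drop j, hj, List.drop_suffix _ _⟩)
    rw [hfind, pvSplitR_no_occ old.toList pattern.toList hno]
    norm_num

-- ===== VERDICT (by name: the statement is the Claim_ definition above) =====
theorem patternReplace_spec : Claim_equal_patternReplace := by
  intro pattern old new fill _ hpre
  exact patternReplace_spec_aux pattern old new fill hpre
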